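-- pv_equiv track=rewrite | github.com/usopp-sama/adobe_hackathon | test/1fucked_para_with_same_font.py | label_semantics
-- ===== SOURCE A (Python) =====
-- def label_semantics(heading_text: str) -> str:
--     heading = heading_text.lower()
--     if any(k in heading for k in ["abstract", "summary", "overview"]):
--         return "Summary"
--     elif any(k in heading for k in ["intro", "welcome", "start here"]):
--         return "Introduction"
--     elif any(k in heading for k in ["background", "context", "history"]):
--         return "Background"
--     elif any(k in heading for k in ["method", "approach", "process", "workflow", "procedure"]):
--         return "Methodology"
--     elif any(k in heading for k in ["data", "dataset", "statistics"]):
--         return "Data"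
--     elif any(k in heading for k in ["experiment", "implementation", "setup", "execution"]):
--         return "Execution"
--     elif any(k in heading for k in ["result", "output", "analysis", "evaluation", "findings"]):
--         return "Results"
--     elif any(k in heading for k in ["discussion", "conclusion", "takeaways", "closing"]):
--         return "Conclusion"
--     elif any(k in heading for k in ["faq", "help", "support", "guidelines"]):
--         return "Help"
--     elif any(k in heading for k in ["contact", "team", "about us", "reach us"]):
--         return "About / Contact"
--     elif any(k in heading for k in ["references", "bibliograph"]):
--         return "References"
--     elif any(k in heading for k in ["appendix", "extra", "annexure", "attachment"]):
--         return "Appendix"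
--     elif any(k in heading for k in ["invitation", "you are invited", "event"]):
--         return "Invitation"
--     elif any(k in heading for k in ["agenda", "schedule", "itinerary", "plan"]):
--         return "Schedule"
--     elif any(k in heading for k in ["announcement", "notice", "circular"]):
--         return "Announcement"
--     elif any(k in heading for k in ["report", "findings", "summary report"]):
--         return "Report"
--     else:
--         return "Unknown"
-- ===== SOURCE B (Python) =====
-- # One flat (priority, keyword, label) list; a single pass keeps the matching
-- # entry with minimal priority (argmin), instead of testing keyword groups
-- # branch by branch with short-circuiting as A does.
-- _GROUPS = [
--     ("Summary", ["abstract", "summary", "overview"]),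
--     ("Introduction", ["intro", "welcome", "start here"]),
--     ("Background", ["background", "context", "history"]),
--     ("Methodology", ["method", "approach", "process", "workflow", "procedure"]),
--     ("Data", ["data", "dataset", "statistics"]),
--     ("Execution", ["experiment", "implementation", "setup", "execution"]),
--     ("Results", ["result", "output", "analysis", "evaluation", "findings"]),
--     ("Conclusion", ["discussion", "conclusion", "takeaways", "closing"]),
--     ("Help", ["faq", "help", "support", "guidelines"]),
--     ("About / Contact", ["contact", "team", "about us", "reach us"]),
--     ("References", ["references", "bibliograph"]),
--     ("Appendix", ["appendix", "extra", "annexure", "attachment"]),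
--     ("Invitation", ["invitation", "you are invited", "event"]),
--     ("Schedule", ["agenda", "schedule", "itinerary", "plan"]),
--     ("Announcement", ["announcement", "notice", "circular"]),
--     ("Report", ["report", "findings", "summary report"]),
-- ]
--
-- _KEYWORDS = [(prio, kw, label)
--              for prio, (label, kws) in enumerate(_GROUPS)
--              for kw in kws]
--
-- def label_semantics(heading_text: str) -> str:
--     heading = heading_text.lower()
--     best = None  # (priority, label) of the best match seen so far
--     for prio, kw, label in _KEYWORDS:
--         if kw in heading and (best is None or prio < best[0]):
--             best = (prio, label)
--     return best[1] if best is not None else "Unknown"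
-- ===== Notes on version B (the rewrite author's own statement) =====
-- stated objective: alternative
-- what changed: Instead of A's short-circuiting sixteen-branch if/elif chain over keyword groups, B flattens all keywords into one (priority, keyword, label) list and makes a single argmin pass keeping the matching entry of minimal priority.
import Mathlib
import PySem

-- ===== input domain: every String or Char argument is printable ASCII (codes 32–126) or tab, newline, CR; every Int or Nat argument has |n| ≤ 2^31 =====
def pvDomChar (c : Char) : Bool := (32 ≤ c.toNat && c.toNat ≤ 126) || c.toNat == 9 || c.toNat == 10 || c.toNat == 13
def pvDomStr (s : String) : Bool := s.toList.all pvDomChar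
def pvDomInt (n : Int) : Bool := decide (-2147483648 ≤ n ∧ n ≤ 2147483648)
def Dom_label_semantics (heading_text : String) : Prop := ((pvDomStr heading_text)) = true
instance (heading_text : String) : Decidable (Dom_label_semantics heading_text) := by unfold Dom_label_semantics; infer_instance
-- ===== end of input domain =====

-- B replaces A's short-circuiting sixteen-branch if/elif chain by one argmin pass over a flat
-- (priority, keyword, label) list, keeping the matching entry of minimal priority (objective: alternative).

-- ===== PORT A =====
def label_semantics (heading_text : String) : String :=
  let heading := PySem.Str.lower heading_text
  if (["abstract", "summary", "overview"] : List String).any (fun k => PySem.Str.isIn k heading) then "Summary"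
  else if (["intro", "welcome", "start here"] : List String).any (fun k => PySem.Str.isIn k heading) then "Introduction"
  else if (["background", "context", "history"] : List String).any (fun k => PySem.Str.isIn k heading) then "Background"
  else if (["method", "approach", "process", "workflow", "procedure"] : List String).any (fun k => PySem.Str.isIn k heading) then "Methodology"
  else if (["data", "dataset", "statistics"] : List String).any (fun k => PySem.Str.isIn k heading) then "Data"
  else if (["experiment", "implementation", "setup", "execution"] : List String).any (fun k => PySem.Str.isIn k heading) then "Execution"
  else if (["result", "output", "analysis", "evaluation", "findings"] : List String).any (fun k => PySem.Str.isIn k heading) then "Results"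
  else if (["discussion", "conclusion", "takeaways", "closing"] : List String).any (fun k => PySem.Str.isIn k heading) then "Conclusion"
  else if (["faq", "help", "support", "guidelines"] : List String).any (fun k => PySem.Str.isIn k heading) then "Help"
  else if (["contact", "team", "about us", "reach us"] : List String).any (fun k => PySem.Str.isIn k heading) then "About / Contact"
  else if (["references", "bibliograph"] : List String).any (fun k => PySem.Str.isIn k heading) then "References"
  else if (["appendix", "extra", "annexure", "attachment"] : List String).any (fun k => PySem.Str.isIn k heading) then "Appendix"
  else if (["invitation", "you are invited", "event"] : List String).any (fun k => PySem.Str.isIn k heading) then "Invitation"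
  else if (["agenda", "schedule", "itinerary", "plan"] : List String).any (fun k => PySem.Str.isIn k heading) then "Schedule"
  else if (["announcement", "notice", "circular"] : List String).any (fun k => PySem.Str.isIn k heading) then "Announcement"
  else if (["report", "findings", "summary report"] : List String).any (fun k => PySem.Str.isIn k heading) then "Report"
  else "Unknown"

-- ===== PORT B =====
-- the flat (priority, keyword, label) list _KEYWORDS of Source B (written out, as Python computes it once at import)
def kwTable : List (Nat × String × String) :=
  [ (0, "abstract", "Summary"), (0, "summary", "Summary"), (0, "overview", "Summary"),
    (1, "intro", "Introduction"), (1, "welcome", "Introduction"), (1, "start here", "Introduction"),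
    (2, "background", "Background"), (2, "context", "Background"), (2, "history", "Background"),
    (3, "method", "Methodology"), (3, "approach", "Methodology"), (3, "process", "Methodology"),
    (3, "workflow", "Methodology"), (3, "procedure", "Methodology"),
    (4, "data", "Data"), (4, "dataset", "Data"), (4, "statistics", "Data"),
    (5, "experiment", "Execution"), (5, "implementation", "Execution"), (5, "setup", "Execution"), (5, "execution", "Execution"),
    (6, "result", "Results"), (6, "output", "Results"), (6, "analysis", "Results"),
    (6, "evaluation", "Results"), (6, "findings", "Results"),
    (7, "discussion", "Conclusion"), (7, "conclusion", "Conclusion"), (7, "takeaways", "Conclusion"), (7, "closing", "Conclusion"),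
    (8, "faq", "Help"), (8, "help", "Help"), (8, "support", "Help"), (8, "guidelines", "Help"),
    (9, "contact", "About / Contact"), (9, "team", "About / Contact"),
    (9, "about us", "About / Contact"), (9, "reach us", "About / Contact"),
    (10, "references", "References"), (10, "bibliograph", "References"),
    (11, "appendix", "Appendix"), (11, "extra", "Appendix"), (11, "annexure", "Appendix"), (11, "attachment", "Appendix"),
    (12, "invitation", "Invitation"), (12, "you are invited", "Invitation"), (12, "event", "Invitation"),
    (13, "agenda", "Schedule"), (13, "schedule", "Schedule"), (13, "itinerary", "Schedule"), (13, "plan", "Schedule"),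
    (14, "announcement", "Announcement"), (14, "notice", "Announcement"), (14, "circular", "Announcement"),
    (15, "report", "Report"), (15, "findings", "Report"), (15, "summary report", "Report") ]

-- the loop body: keep the matching entry of strictly smaller priority
def bestStep (heading : String) (best : Option (Nat × String)) (e : Nat × String × String) : Option (Nat × String) :=
  if PySem.Str.isIn e.2.1 heading &&
     (match best with | none => true | some (b, _) => decide (e.1 < b)) then
    some (e.1, e.2.2)
  else best

def label_semantics_alt (heading_text : String) : String :=
  let heading := PySem.Str.lower heading_text
  match kwTable.foldl (bestStep heading) none with
  | some (_, label) => label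
  | none => "Unknown"

-- ===== PRECONDITION & SPEC =====
def Spec_label_semantics (heading_text : String) (out : String) : Prop := out = label_semantics_alt heading_text
instance (heading_text : String) (out : String) : Decidable (Spec_label_semantics heading_text out) := by unfold Spec_label_semantics; infer_instance

-- ===== CLAIM (what is proved, stated in full; the proofs are below) =====
def Claim_equal_label_semantics : Prop := ∀ (heading_text : String), Dom_label_semantics heading_text → Spec_label_semantics heading_text (label_semantics heading_text)

-- ===== LEMMAS AND PROOFS =====

-- A's grouped view, as data: the if/elif chain is the first-match scan of this list
def groupsL : List (List String × String) :=
  [ (["abstract", "summary", "overview"], "Summary"),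
    (["intro", "welcome", "start here"], "Introduction"),
    (["background", "context", "history"], "Background"),
    (["method", "approach", "process", "workflow", "procedure"], "Methodology"),
    (["data", "dataset", "statistics"], "Data"),
    (["experiment", "implementation", "setup", "execution"], "Execution"),
    (["result", "output", "analysis", "evaluation", "findings"], "Results"),
    (["discussion", "conclusion", "takeaways", "closing"], "Conclusion"),
    (["faq", "help", "support", "guidelines"], "Help"),
    (["contact", "team", "about us", "reach us"], "About / Contact"),
    (["references", "bibliograph"], "References"),
    (["appendix", "extra", "annexure", "attachment"], "Appendix"),
    (["invitation", "you are invited", "event"], "Invitation"),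
    (["agenda", "schedule", "itinerary", "plan"], "Schedule"),
    (["announcement", "notice", "circular"], "Announcement"),
    (["report", "findings", "summary report"], "Report") ]

def chainResult (heading : String) : List (List String × String) → String
  | [] => "Unknown"
  | (kws, label) :: rest =>
      if kws.any (fun k => PySem.Str.isIn k heading) then label else chainResult heading rest

def flatIdx : List (List String × String) → Nat → List (Nat × String × String)
  | [], _ => []
  | (kws, label) :: rest, i => kws.map (fun k => (i, k, label)) ++ flatIdx rest (i + 1)

lemma A_eq_chain (h : String) :
    label_semantics h = chainResult (PySem.Str.lower h) groupsL := rfl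

lemma kwTable_eq : kwTable = flatIdx groupsL 0 := rfl

-- a best entry whose priority is not above the whole group is never replaced inside the group
lemma foldl_group_skip (h : String) (kws : List String) (i b : Nat) (lab lb : String)
    (hb : ¬ i < b) :
    kws.foldl (fun acc k => bestStep h acc (i, k, lab)) (some (b, lb)) = some (b, lb) := by
  induction kws with
  | nil => rfl
  | cons k kws ih =>
      simp only [List.foldl_cons, bestStep, hb, decide_false, Bool.and_false, if_neg,
        Bool.false_eq_true, not_false_eq_true]
      exact ih

-- folding one group from `none` yields its own (priority, label) iff some keyword matches
lemma foldl_group_none (h : String) (kws : List String) (i : Nat) (lab : String) :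
    kws.foldl (fun acc k => bestStep h acc (i, k, lab)) none
      = if kws.any (fun k => PySem.Str.isIn k h) then some (i, lab) else none := by
  induction kws with
  | nil => rfl
  | cons k kws ih =>
      by_cases hk : PySem.Str.isIn k h = true
      · simp only [List.foldl_cons, List.any_cons, hk, Bool.true_or, if_pos, bestStep,
          Bool.and_true]
        exact foldl_group_skip h kws i i lab lab (lt_irrefl i)
      · simp only [List.foldl_cons, List.any_cons, bestStep, Bool.eq_false_iff.mpr hk,
          Bool.false_and, if_neg, Bool.false_eq_true, not_false_eq_true,
          Bool.false_or]
        exact ih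

-- once the best priority is below every remaining index, the tail changes nothing
lemma foldl_tail_skip (h : String) (gs : List (List String × String)) (i b : Nat) (lb : String)
    (hb : b < i) :
    (flatIdx gs i).foldl (bestStep h) (some (b, lb)) = some (b, lb) := by
  induction gs generalizing i with
  | nil => rfl
  | cons g gs ih =>
      obtain ⟨kws, lab⟩ := g
      rw [flatIdx, List.foldl_append, List.foldl_map]
      rw [foldl_group_skip h kws i b lab lb (Nat.lt_asymm hb)]
      exact ih (i + 1) (Nat.lt_succ_of_lt hb)

-- main invariant: the argmin pass over the flattened table equals the first-match chain
lemma foldl_eq_chain (h : String) (gs : List (List String × String)) (i : Nat) :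
    (match (flatIdx gs i).foldl (bestStep h) none with
      | some (_, label) => label
      | none => "Unknown")
      = chainResult h gs := by
  induction gs generalizing i with
  | nil => rfl
  | cons g gs ih =>
      obtain ⟨kws, lab⟩ := g
      rw [flatIdx, List.foldl_append, List.foldl_map, foldl_group_none, chainResult]
      by_cases hm : kws.any (fun k => PySem.Str.isIn k h) = true
      · rw [if_pos hm, if_pos hm, foldl_tail_skip h gs (i + 1) i lab (Nat.lt_succ_self i)]
      · rw [if_neg hm, if_neg hm]
        exact ih (i + 1)

-- ===== VERDICT (by name: the statement is the Claim_ definition above) =====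
theorem label_semantics_spec : Claim_equal_label_semantics := by
  intro h _
  show label_semantics h = label_semantics_alt h
  rw [A_eq_chain, label_semantics_alt, kwTable_eq]
  exact (foldl_eq_chain (PySem.Str.lower h) groupsL 0).symm
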